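-- pv_equiv track=rewrite | github.com/Farhan-Faisal/goal_research | utils/handle_batches.py | get_required_batches
-- ===== SOURCE A (Python) =====
-- def get_required_batches(df):
--     required_batches = []
--     counter = len(df)
--     i = 1
--     while counter >= 25:
--         required_batches.append(i)
--         i = i + 1
--         counter = counter - 25
--
--     if counter == 0:
--         required_batches.append(i)
--
--     return required_batches
-- ===== SOURCE B (Python) =====
-- def get_required_batches(df):
--     n = len(df)
--     count = n // 25 + (1 if n % 25 == 0 else 0)
--     return list(range(1, count + 1))
-- ===== Notes on version B (the rewrite author's own statement) =====
-- stated objective: simpler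
-- what changed: Replaces the decrementing while-loop that appends counters one by one with a closed-form divmod computation and a single range(), preserving the extra element when len(df) is a multiple of 25 (including the empty case).
import Mathlib
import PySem

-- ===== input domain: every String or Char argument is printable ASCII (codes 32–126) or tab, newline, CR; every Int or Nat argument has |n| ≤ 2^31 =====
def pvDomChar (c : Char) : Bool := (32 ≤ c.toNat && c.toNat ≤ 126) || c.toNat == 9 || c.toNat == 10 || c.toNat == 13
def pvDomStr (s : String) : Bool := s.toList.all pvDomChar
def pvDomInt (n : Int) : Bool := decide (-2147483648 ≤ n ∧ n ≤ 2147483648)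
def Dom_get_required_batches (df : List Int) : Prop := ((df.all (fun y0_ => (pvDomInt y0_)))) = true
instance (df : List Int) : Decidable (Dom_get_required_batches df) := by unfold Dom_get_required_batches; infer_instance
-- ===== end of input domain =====

-- B replaces A's decrementing while-loop with a closed-form divmod and one range (simpler).

-- ===== PORT A =====
-- the while-loop of A: state (counter, i, required_batches); followed by the final `if counter == 0` append
def get_required_batches_loop (counter i : Int) (acc : List Int) : List Int :=
  if _h : counter ≥ 25 then
    get_required_batches_loop (counter - 25) (i + 1) (acc ++ [i])
  else
    if counter = 0 then acc ++ [i] else acc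
termination_by counter.toNat
decreasing_by omega

def get_required_batches (df : List Int) : List Int :=
  get_required_batches_loop (df.length : Int) 1 []

-- ===== PORT B =====
def get_required_batches_alt (df : List Int) : List Int :=
  let n : Int := (df.length : Int)
  let count := PySem.Int.floordiv n 25 + (if PySem.Int.mod n 25 = 0 then 1 else 0)
  PySem.List.pyRange 1 (count + 1) 1

-- ===== PRECONDITION & SPEC =====
def Spec_get_required_batches (df : List Int) (out : List Int) : Prop := out = get_required_batches_alt df
instance (df : List Int) (out : List Int) : Decidable (Spec_get_required_batches df out) := by unfold Spec_get_required_batches; infer_instance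

-- ===== CLAIM (what is proved, stated in full; the proofs are below) =====
def Claim_equal_get_required_batches : Prop := ∀ (df : List Int), Dom_get_required_batches df → Spec_get_required_batches df (get_required_batches df)

-- ===== LEMMAS AND PROOFS =====

-- the loop, started at counter = 25*k + r with 0 ≤ r < 25, appends k (or k+1 when r = 0) consecutive integers from i
theorem get_required_batches_loop_eq (k : Nat) (r i : Int) (hr0 : 0 ≤ r) (hr : r < 25)
    (acc : List Int) :
    get_required_batches_loop (25 * (k : Int) + r) i acc =
      acc ++ (List.range (k + (if r = 0 then 1 else 0))).map (fun j : Nat => i + (j : Int)) := by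
  induction k generalizing i acc with
  | zero =>
    rw [get_required_batches_loop]
    have h1 : ¬ (25 * ((0 : Nat) : Int) + r ≥ 25) := by omega
    rw [dif_neg h1]
    by_cases hz : r = 0
    · simp [hz]
    · simp [hz]
  | succ m ih =>
    rw [get_required_batches_loop]
    have h1 : 25 * ((m + 1 : Nat) : Int) + r ≥ 25 := by push_cast; omega
    rw [dif_pos h1]
    have h2 : 25 * ((m + 1 : Nat) : Int) + r - 25 = 25 * ((m : Nat) : Int) + r := by
      push_cast; ring
    rw [h2, ih, List.append_assoc]
    congr 1
    have hsucc : (m + 1 + (if r = 0 then 1 else 0)) = (m + (if r = 0 then 1 else 0)) + 1 := by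
      omega
    rw [hsucc, List.range_succ_eq_map]
    simp only [List.map_cons, List.map_map, Nat.cast_zero, add_zero, List.singleton_append]
    congr 1
    apply List.map_congr_left
    intro a _
    simp [Function.comp, Nat.succ_eq_add_one]
    ring

-- ===== VERDICT (by name: the statement is the Claim_ definition above) =====
theorem get_required_batches_spec : Claim_equal_get_required_batches := by
  intro df _
  unfold Spec_get_required_batches get_required_batches get_required_batches_alt
  have key : (df.length : Int) = 25 * ((df.length / 25 : Nat) : Int) + ((df.length % 25 : Nat) : Int) := by
    push_cast
    omega
  have hr0 : (0 : Int) ≤ ((df.length % 25 : Nat) : Int) := by positivity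
  have hr : ((df.length % 25 : Nat) : Int) < 25 := by
    have := Nat.mod_lt df.length (by norm_num : 0 < 25)
    exact_mod_cast this
  rw [PySem.List.pyRange_one, key, get_required_batches_loop_eq _ _ _ hr0 hr, List.nil_append]
  congr 1
  have hfd : PySem.Int.floordiv (25 * ((df.length / 25 : Nat) : Int) + ((df.length % 25 : Nat) : Int)) 25
      = ((df.length / 25 : Nat) : Int) := by
    simp [PySem.Int.floordiv, Int.fdiv_eq_ediv]
    omega
  have hmd : PySem.Int.mod (25 * ((df.length / 25 : Nat) : Int) + ((df.length % 25 : Nat) : Int)) 25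
      = ((df.length % 25 : Nat) : Int) := by
    simp [PySem.Int.mod, Int.fmod_eq_emod]
  rw [hfd, hmd]
  congr 1
  by_cases hz : ((df.length % 25 : Nat) : Int) = 0
  · rw [if_pos hz, if_pos hz]
    omega
  · rw [if_neg hz, if_neg hz]
    omega
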